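-- pv_equiv track=rewrite | github.com/mortennp/mooc | UCSD_Bioinformatics/BioinformaticsSpyder/BioinformaticsI/DnaReplication/MinimumSkew_1E.py | yield_skew_by_positions
-- ===== SOURCE A (Python) =====
-- def yield_skew_by_positions(text):
--     skew = 0
--     position = 0
--     yield position, skew
--     for i in range(len(text)):
--         position += 1
--         nucleotide = text[i:i+1]
--         if "G" == nucleotide:
--             skew += 1
--         elif "C" == nucleotide:
--             skew -= 1
--         yield position, skew
-- ===== SOURCE B (Python) =====
-- def yield_skew_by_positions(text):
--     for p in range(len(text) + 1):
--         prefix = text[:p]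
--         yield (p, prefix.count("G") - prefix.count("C"))
-- ===== Notes on version B (the rewrite author's own statement) =====
-- stated objective: alternative
-- what changed: Replaced A's fused accumulator loop (position and skew threaded through one pass) by a stateless closed form: for each position p the skew is recomputed from scratch as the difference of the guanine and cytosine counts of the prefix text[:p], so no running state is carried between positions; B is quadratic and slower on large inputs.
import Mathlib
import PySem

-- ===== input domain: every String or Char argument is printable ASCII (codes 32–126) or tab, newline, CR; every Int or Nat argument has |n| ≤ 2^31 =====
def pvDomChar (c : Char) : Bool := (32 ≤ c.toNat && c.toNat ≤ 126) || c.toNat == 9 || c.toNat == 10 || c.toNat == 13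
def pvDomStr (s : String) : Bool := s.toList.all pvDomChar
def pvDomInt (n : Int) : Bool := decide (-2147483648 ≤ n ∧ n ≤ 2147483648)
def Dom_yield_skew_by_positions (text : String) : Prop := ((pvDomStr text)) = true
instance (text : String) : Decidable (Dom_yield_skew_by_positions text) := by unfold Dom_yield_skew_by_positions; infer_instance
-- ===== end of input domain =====

-- B replaces A's fused running-state loop by a stateless per-position closed form
-- (skew at p recomputed as the difference of two substring counts of text[:p]);
-- alternative decomposition, quadratic, not faster.

-- ===== PORT A =====
def yield_skew_by_positions (text : String) : List (Int × Int) :=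
  let skew : Int := 0
  let position : Int := 0
  let acc : List (Int × Int) := [(position, skew)]
  let st := (PySem.List.pyRange 0 (PySem.Str.len text) 1).foldl
    (fun (st : Int × Int × List (Int × Int)) i =>
      let position := st.2.1 + 1
      let nucleotide := PySem.Str.slice text (some i) (some (i + 1))
      let skew := if "G" = nucleotide then st.1 + 1
                  else if "C" = nucleotide then st.1 - 1 else st.1
      (skew, position, st.2.2 ++ [(position, skew)]))
    (skew, position, acc)
  st.2.2

-- ===== PORT B =====
def yield_skew_by_positions_alt (text : String) : List (Int × Int) :=
  (PySem.List.pyRange 0 (PySem.Str.len text + 1) 1).map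
    (fun p =>
      let pfx := PySem.Str.slice text none (some p)
      (p, (PySem.Str.count pfx "G" : Int) - (PySem.Str.count pfx "C" : Int)))

-- ===== PRECONDITION & SPEC =====
def Spec_yield_skew_by_positions (text : String) (out : List (Int × Int)) : Prop := out = yield_skew_by_positions_alt text
instance (text : String) (out : List (Int × Int)) : Decidable (Spec_yield_skew_by_positions text out) := by unfold Spec_yield_skew_by_positions; infer_instance

-- ===== CLAIM (what is proved, stated in full; the proofs are below) =====
def Claim_equal_yield_skew_by_positions : Prop := ∀ (text : String), Dom_yield_skew_by_positions text → Spec_yield_skew_by_positions text (yield_skew_by_positions text)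

-- ===== LEMMAS AND PROOFS =====

-- skew of a fixed prefix, and the canonical result both ports are shown to equal
def pvSkewOf (cs : List Char) : Int := (cs.count 'G' : Int) - (cs.count 'C' : Int)

def pvCanon (cs : List Char) : List (Int × Int) :=
  (List.range (cs.length + 1)).map (fun (p : Nat) => ((p : Int), pvSkewOf (cs.take p)))

-- str.count with a single-character needle is List.count (specific to B's two count calls)
lemma pvGoSingleton (c : Char) (l : List Char) : ∀ (fuel acc : Nat), l.length ≤ fuel →
    PySem.Chars.count.go [c] fuel l acc = acc + l.count c := by
  induction l with
  | nil => intro fuel acc _; cases fuel <;> simp [PySem.Chars.count.go]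
  | cons h t ih =>
    intro fuel acc hf
    cases fuel with
    | zero => simp at hf
    | succ f =>
      rw [PySem.Chars.count.go]
      simp only [List.length_cons] at hf
      by_cases hc : c = h
      · subst hc
        simp only [List.isPrefixOf, beq_self_eq_true, Bool.true_and,
          if_true, List.length_cons, List.length_nil, List.drop_succ_cons, List.drop_zero]
        rw [ih f (acc + 1) (by omega)]
        simp
        omega
      · have : ([c].isPrefixOf (h :: t)) = false := by
          simp [List.isPrefixOf, hc]
        rw [this]
        simp only [Bool.false_eq_true, if_false]
        rw [ih f acc (by omega)]
        simp [Ne.symm hc]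

lemma pvCountSingleton (s : String) (c : Char) :
    PySem.Str.count s (String.ofList [c]) = s.toList.count c := by
  simp only [PySem.Str.count_eq, String.toList_ofList]
  rw [PySem.Chars.count]
  simp only [List.isEmpty_cons, Bool.false_eq_true, if_false]
  simpa using pvGoSingleton c s.toList s.toList.length 0 le_rfl

lemma pvSkewOf_take_succ (cs : List Char) (m : Nat) (hm : m < cs.length) :
    pvSkewOf (cs.take (m + 1)) = pvSkewOf (cs.take m) +
      (if 'G' = cs[m] then 1 else if 'C' = cs[m] then -1 else 0) := by
  rw [List.take_succ, List.getElem?_eq_getElem hm]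
  simp only [Option.toList_some, pvSkewOf, List.count_append, List.count_singleton]
  by_cases hg : 'G' = cs[m]
  · simp [← hg]; ring
  · by_cases hc : 'C' = cs[m]
    · simp [← hc]; ring
    · simp [hg, hc, Ne.symm hg, Ne.symm hc]

-- invariant of A's loop: after m iterations the state is (skew of take m, m, canonical prefix list)
lemma pvA_loop (text : String) (m : Nat) (hm : m ≤ text.toList.length) :
    (PySem.List.pyRange 0 (m : Int) 1).foldl
      (fun (st : Int × Int × List (Int × Int)) i =>
        (if "G" = PySem.Str.slice text (some i) (some (i + 1)) then st.1 + 1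
          else if "C" = PySem.Str.slice text (some i) (some (i + 1)) then st.1 - 1 else st.1,
          st.2.1 + 1,
          st.2.2 ++
            [(st.2.1 + 1,
                if "G" = PySem.Str.slice text (some i) (some (i + 1)) then st.1 + 1
                else if "C" = PySem.Str.slice text (some i) (some (i + 1)) then st.1 - 1 else st.1)]))
      (0, 0, [(0, 0)]) =
    (pvSkewOf (text.toList.take m), (m : Int),
      (List.range (m + 1)).map (fun (p : Nat) => ((p : Int), pvSkewOf (text.toList.take p)))) := by
  induction m with
  | zero => simp [PySem.List.pyRange_one_eq_nil, pvSkewOf]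
  | succ n ih =>
    have hn : n ≤ text.toList.length := by omega
    have hrange : PySem.List.pyRange 0 ((n + 1 : Nat) : Int) 1 =
        PySem.List.pyRange 0 (n : Int) 1 ++ [(n : Int)] := by
      push_cast
      exact PySem.List.pyRange_one_succ_right (by positivity)
    rw [hrange, List.foldl_append, ih hn]
    have hnuc : PySem.Str.slice text (some (n : Int)) (some ((n : Int) + 1)) =
        String.ofList [text.toList[n]'(by omega)] := by
      apply String.toList_injective
      rw [PySem.Str.toList_slice, PySem.Chars.slice_eq_listSlice]
      rw [show ((n : Int) + 1) = ((n : Int) + ((1 : Nat) : Int)) by norm_num]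
      rw [PySem.List.slice_natCast_add]
      have hd : List.drop n text.toList = text.toList[n]'(by omega) :: List.drop (n+1) text.toList :=
        List.drop_eq_getElem_cons (by omega)
      rw [hd, List.take_succ_cons, List.take_zero]
      simp
    simp only [List.foldl_cons, List.foldl_nil]
    rw [hnuc, pvSkewOf_take_succ text.toList n (by omega)]
    have hGiff : ("G" = String.ofList [text.toList[n]'(by omega)]) ↔ ('G' = text.toList[n]'(by omega)) := by
      constructor
      · intro h
        have := congrArg String.toList h
        simpa using this
      · intro h; rw [← h]
    have hCiff : ("C" = String.ofList [text.toList[n]'(by omega)]) ↔ ('C' = text.toList[n]'(by omega)) := by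
      constructor
      · intro h
        have := congrArg String.toList h
        simpa using this
      · intro h; rw [← h]
    have hpos : ((n : Int) + 1) = ((n + 1 : Nat) : Int) := by push_cast; ring
    by_cases hg : 'G' = text.toList[n]'(by omega)
    · simp only [hGiff, hg, hpos, List.range_succ, List.map_append, List.map_cons,
        List.map_nil]
      rw [pvSkewOf_take_succ text.toList n (by omega)]
      simp [← hg]
    · by_cases hcc : 'C' = text.toList[n]'(by omega)
      · simp only [hGiff, hCiff, hg, hcc, hpos,
          List.range_succ, List.map_append, List.map_cons, List.map_nil]
        rw [pvSkewOf_take_succ text.toList n (by omega)]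
        simp [hg, ← hcc]
        omega
      · simp only [hGiff, hCiff, hg, hcc, hpos, List.range_succ, List.map_append,
          List.map_cons, List.map_nil]
        rw [pvSkewOf_take_succ text.toList n (by omega)]
        simp [hg, hcc]

lemma pvA_eq_canon (text : String) : yield_skew_by_positions text = pvCanon text.toList := by
  unfold yield_skew_by_positions pvCanon
  simp only [PySem.Str.len_eq, ← String.length_toList]
  rw [pvA_loop text text.toList.length le_rfl]

lemma pvB_eq_canon (text : String) : yield_skew_by_positions_alt text = pvCanon text.toList := by
  unfold yield_skew_by_positions_alt pvCanon
  have h1 : PySem.Str.len text + 1 = ((text.toList.length + 1 : Nat) : Int) := by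
    simp [PySem.Str.len_eq]
  rw [h1, PySem.List.pyRange_zero_natCast]
  rw [List.map_map]
  apply List.map_congr_left
  intro p hp
  simp only [List.mem_range] at hp
  simp only [Function.comp]
  have hg : ("G" : String) = String.ofList ['G'] := by rfl
  have hc : ("C" : String) = String.ofList ['C'] := by rfl
  rw [hg, hc, pvCountSingleton, pvCountSingleton]
  have : (PySem.Str.slice text none (some ((p : Nat) : Int))).toList = text.toList.take p := by
    simp [PySem.Str.toList_slice, PySem.List.slice_to_natCast]
  rw [this]
  rfl

-- ===== VERDICT (by name: the statement is the Claim_ definition above) =====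
theorem yield_skew_by_positions_spec : Claim_equal_yield_skew_by_positions := by
  intro text _
  unfold Spec_yield_skew_by_positions
  rw [pvA_eq_canon, pvB_eq_canon]
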